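-- pv_equiv track=rewrite | github.com/luisrui/CV-homework | clustering algorithm/k-means++.py | choose_center
-- ===== SOURCE A (Python) =====
-- def choose_center(pot_x,pot_y,centers_x,centers_y,k):
--     #通过训练选择优化的初始聚类中心
--     max_x,max_y,max_distance = 0,0,0;
--     for i in range(k-1):
--         for x,y in zip(pot_x,pot_y):
--             for centerx,centery in zip(centers_x,centers_y):
--                 temp = max_distance
--                 distance = (x-centerx)**2+(y-centery)**2
--                 max_distance = max(max_distance,distance)
--                 if(temp!=max_distance):
--                     max_x = x
--                     max_y = y
--         centers_x.append(max_x)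
--         centers_y.append(max_y)
--     return centers_x,centers_y
-- ===== SOURCE B (Python) =====
-- def choose_center(pot_x, pot_y, centers_x, centers_y, k):
--     # Incremental farthest-pair selection.  d[i] holds point i's largest squared
--     # distance to the center pairs folded in so far; each round folds in only the
--     # center pairs not yet seen, so the center list is never rescanned.  The
--     # farthest distance found is a running record over the whole selection: a
--     # round that produces no strictly farther point re-appends the record holder.
--     pts = list(zip(pot_x, pot_y))
--     d = [0] * len(pts)
--     seen = 0
--     bx, by, bd = 0, 0, 0
--     for _ in range(k - 1):
--         pairs = list(zip(centers_x, centers_y))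
--         for cx, cy in pairs[seen:]:
--             for i, (x, y) in enumerate(pts):
--                 d[i] = max(d[i], (x - cx) ** 2 + (y - cy) ** 2)
--         seen = len(pairs)
--         for i, (x, y) in enumerate(pts):
--             if d[i] > bd:
--                 bx, by, bd = x, y, d[i]
--         centers_x.append(bx)
--         centers_y.append(by)
--     return centers_x, centers_y
-- ===== Notes on version B (the rewrite author's own statement) =====
-- stated objective: faster
-- what changed: B keeps a per-point array of max squared distances to the center pairs folded in so far and each round folds in only the not-yet-seen center pairs before scanning for the record holder, instead of A's per-round rescan of every point against the whole center list.
import Mathlib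
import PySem

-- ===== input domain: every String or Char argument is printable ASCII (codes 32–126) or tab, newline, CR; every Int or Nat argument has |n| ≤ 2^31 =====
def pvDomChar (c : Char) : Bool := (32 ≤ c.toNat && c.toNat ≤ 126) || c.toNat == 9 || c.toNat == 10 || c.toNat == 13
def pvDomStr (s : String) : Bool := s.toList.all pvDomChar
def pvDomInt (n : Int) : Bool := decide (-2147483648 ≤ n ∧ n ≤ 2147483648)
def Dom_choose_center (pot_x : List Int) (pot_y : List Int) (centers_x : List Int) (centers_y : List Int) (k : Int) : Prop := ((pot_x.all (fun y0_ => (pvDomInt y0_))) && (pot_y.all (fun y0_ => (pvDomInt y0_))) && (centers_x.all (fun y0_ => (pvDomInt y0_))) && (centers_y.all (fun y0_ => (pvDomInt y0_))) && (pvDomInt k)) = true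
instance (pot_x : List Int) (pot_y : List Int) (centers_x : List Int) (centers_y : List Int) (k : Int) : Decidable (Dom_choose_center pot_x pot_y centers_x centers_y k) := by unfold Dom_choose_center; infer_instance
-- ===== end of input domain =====

-- B replaces A's per-round rescan of every point against the whole center list by per-point
-- running max distances into which each round folds only the not-yet-seen center pairs.
-- A mutates centers_x/centers_y in place (B does the same); the theorems are about the return value.

-- ===== PORT A =====
def pvDist (x y cx cy : Int) : Int := (x - cx) ^ 2 + (y - cy) ^ 2

-- inner "for centerx,centery in zip(...)" loop of A, state = (max_x, max_y, max_distance)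
def pvInnerA (x y : Int) (cs : List (Int × Int)) (st : Int × Int × Int) : Int × Int × Int :=
  cs.foldl (fun st c =>
    let temp := st.2.2
    let md := max st.2.2 (pvDist x y c.1 c.2)
    if temp ≠ md then (x, y, md) else (st.1, st.2.1, md)) st

-- one iteration of "for i in range(k-1)", state = (centers_x, centers_y, max_x, max_y, max_distance)
def pvRoundA (pts : List (Int × Int)) (s : List Int × List Int × Int × Int × Int) :
    List Int × List Int × Int × Int × Int :=
  let cs := s.1.zip s.2.1
  let st := pts.foldl (fun st p => pvInnerA p.1 p.2 cs st) (s.2.2.1, s.2.2.2.1, s.2.2.2.2)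
  (s.1 ++ [st.1], s.2.1 ++ [st.2.1], st.1, st.2.1, st.2.2)

def choose_center (pot_x : List Int) (pot_y : List Int) (centers_x : List Int) (centers_y : List Int) (k : Int) : List Int × List Int :=
  let pts := pot_x.zip pot_y
  let fin := (PySem.List.pyRange 0 (k - 1) 1).foldl (fun s _ => pvRoundA pts s)
    (centers_x, centers_y, 0, 0, 0)
  (fin.1, fin.2.1)

-- ===== PORT B =====
-- "for cx,cy in pairs[seen:]: for i,(x,y) in enumerate(pts): d[i] = max(d[i], …)"
def pvFoldNew (pts : List (Int × Int)) (new : List (Int × Int)) (d : List Int) : List Int :=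
  new.foldl (fun d c => (pts.zip d).map (fun q => max q.2 (pvDist q.1.1 q.1.2 c.1 c.2))) d

-- "for i,(x,y) in enumerate(pts): if d[i] > bd: …" over zip pts d
def pvPick (pd : List ((Int × Int) × Int)) (b : Int × Int × Int) : Int × Int × Int :=
  pd.foldl (fun b q => if q.2 > b.2.2 then (q.1.1, q.1.2, q.2) else b) b

-- one round of B, state = (centers_x, centers_y, seen, bx, by, bd, d)
def pvRoundB (pts : List (Int × Int)) (s : List Int × List Int × Nat × Int × Int × Int × List Int) :
    List Int × List Int × Nat × Int × Int × Int × List Int :=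
  let pairs := s.1.zip s.2.1
  let d := pvFoldNew pts (pairs.drop s.2.2.1) s.2.2.2.2.2.2
  let st := pvPick (pts.zip d) (s.2.2.2.1, s.2.2.2.2.1, s.2.2.2.2.2.1)
  (s.1 ++ [st.1], s.2.1 ++ [st.2.1], pairs.length, st.1, st.2.1, st.2.2, d)

def choose_center_alt (pot_x : List Int) (pot_y : List Int) (centers_x : List Int) (centers_y : List Int) (k : Int) : List Int × List Int :=
  let pts := pot_x.zip pot_y
  let fin := (PySem.List.pyRange 0 (k - 1) 1).foldl (fun s _ => pvRoundB pts s)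
    (centers_x, centers_y, 0, 0, 0, 0, pts.map (fun _ => (0 : Int)))
  (fin.1, fin.2.1)

-- ===== PRECONDITION & SPEC =====
-- (A is total: no Pre_.)
def Spec_choose_center (pot_x : List Int) (pot_y : List Int) (centers_x : List Int) (centers_y : List Int) (k : Int) (out : List Int × List Int) : Prop := out = choose_center_alt pot_x pot_y centers_x centers_y k
instance (pot_x : List Int) (pot_y : List Int) (centers_x : List Int) (centers_y : List Int) (k : Int) (out : List Int × List Int) : Decidable (Spec_choose_center pot_x pot_y centers_x centers_y k out) := by unfold Spec_choose_center; infer_instance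

-- ===== CLAIM (what is proved, stated in full; the proofs are below) =====
def Claim_equal_choose_center : Prop := ∀ (pot_x : List Int) (pot_y : List Int) (centers_x : List Int) (centers_y : List Int) (k : Int), Dom_choose_center pot_x pot_y centers_x centers_y k → Spec_choose_center pot_x pot_y centers_x centers_y k (choose_center pot_x pot_y centers_x centers_y k)

-- ===== LEMMAS AND PROOFS =====

theorem pvDist_nonneg (x y cx cy : Int) : 0 ≤ pvDist x y cx cy := by
  unfold pvDist; positivity

theorem foldl_max_base (f : Int × Int → Int) (cs : List (Int × Int)) :
    ∀ a b : Int, b ≤ a →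
      cs.foldl (fun m c => max m (f c)) a = max a (cs.foldl (fun m c => max m (f c)) b) := by
  induction cs with
  | nil => intro a b h; simp; omega
  | cons c cs ih =>
      intro a b h
      simp only [List.foldl_cons]
      rw [ih (max a (f c)) (f c) (le_max_right _ _),
          ih (max b (f c)) (f c) (le_max_right _ _)]
      omega

-- d-value of one point: its max squared distance to the pairs in cs, starting from 0
def pvDv (x y : Int) (cs : List (Int × Int)) : Int :=
  cs.foldl (fun a c => max a (pvDist x y c.1 c.2)) 0

theorem pvDv_cons (x y : Int) (c : Int × Int) (cs : List (Int × Int)) :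
    pvDv x y (c :: cs) = max (pvDist x y c.1 c.2) (pvDv x y cs) := by
  unfold pvDv
  simp only [List.foldl_cons]
  rw [foldl_max_base (fun c => pvDist x y c.1 c.2) cs (max 0 (pvDist x y c.1 c.2)) 0
      (by have := pvDist_nonneg x y c.1 c.2; omega)]
  have := pvDist_nonneg x y c.1 c.2
  omega

theorem pvDv_append (x y : Int) (cs : List (Int × Int)) (c : Int × Int) :
    pvDv x y (cs ++ [c]) = max (pvDv x y cs) (pvDist x y c.1 c.2) := by
  unfold pvDv; simp [List.foldl_append]

theorem pvInnerA_eq (x y : Int) (cs : List (Int × Int)) :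
    ∀ mx my md : Int, 0 ≤ md →
      pvInnerA x y cs (mx, my, md) =
        if md < pvDv x y cs then (x, y, pvDv x y cs) else (mx, my, md) := by
  induction cs with
  | nil =>
      intro mx my md h
      unfold pvInnerA pvDv
      simp only [List.foldl_nil]
      rw [if_neg (by omega)]
  | cons c cs ih =>
      intro mx my md h
      have hd := pvDist_nonneg x y c.1 c.2
      rw [pvDv_cons]
      unfold pvInnerA
      simp only [List.foldl_cons]
      by_cases h0 : md < pvDist x y c.1 c.2
      · have hmax : max md (pvDist x y c.1 c.2) = pvDist x y c.1 c.2 := by omega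
        simp only [hmax]
        rw [if_pos (by omega : md ≠ pvDist x y c.1 c.2)]
        show pvInnerA x y cs (x, y, pvDist x y c.1 c.2) = _
        rw [ih x y (pvDist x y c.1 c.2) (by omega)]
        split_ifs with h1 h2 h2
        · simp only [Prod.mk.injEq, true_and]; omega
        · omega
        · simp only [Prod.mk.injEq, true_and]; omega
        · omega
      · have hmax : max md (pvDist x y c.1 c.2) = md := by omega
        simp only [hmax, ne_eq, not_true_eq_false, if_false]
        show pvInnerA x y cs (mx, my, md) = _
        rw [ih mx my md h]
        split_ifs with h1 h2 h2
        · simp only [Prod.mk.injEq, true_and]; omega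
        · omega
        · omega
        · rfl

theorem pvPick_cons (q : (Int × Int) × Int) (pd : List ((Int × Int) × Int)) (b : Int × Int × Int) :
    pvPick (q :: pd) b = pvPick pd (if q.2 > b.2.2 then (q.1.1, q.1.2, q.2) else b) := rfl

theorem roundA_pick (pts : List (Int × Int)) (cs : List (Int × Int)) :
    ∀ mx my md : Int, 0 ≤ md →
      pts.foldl (fun st p => pvInnerA p.1 p.2 cs st) (mx, my, md) =
        pvPick (pts.zip (pts.map (fun p => pvDv p.1 p.2 cs))) (mx, my, md) := by
  induction pts with
  | nil => intro mx my md h; rfl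
  | cons p pts ih =>
      intro mx my md h
      simp only [List.map_cons, List.zip_cons_cons, pvPick_cons, List.foldl_cons]
      rw [pvInnerA_eq p.1 p.2 cs mx my md h]
      by_cases h1 : md < pvDv p.1 p.2 cs
      · rw [if_pos h1]
        exact ih p.1 p.2 (pvDv p.1 p.2 cs) (le_of_lt (lt_of_le_of_lt h h1))
      · rw [if_neg h1]
        exact ih mx my md h

theorem pick_md_ge (pd : List ((Int × Int) × Int)) :
    ∀ b : Int × Int × Int, b.2.2 ≤ (pvPick pd b).2.2 := by
  induction pd with
  | nil => intro b; exact le_refl _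
  | cons q pd ih =>
      intro b
      rw [pvPick_cons]
      by_cases h : q.2 > b.2.2
      · rw [if_pos h]
        have := ih (q.1.1, q.1.2, q.2)
        simp only at this
        calc b.2.2 ≤ q.2 := le_of_lt h
          _ ≤ _ := this
      · rw [if_neg h]; exact ih b

-- zipping pts with the map of their d-values, as a single map
theorem zip_map_dv (pts : List (Int × Int)) (cs : List (Int × Int)) :
    pts.zip (pts.map (fun p => pvDv p.1 p.2 cs)) =
      pts.map (fun p => (p, pvDv p.1 p.2 cs)) := by
  have := @List.zip_map' (Int × Int) (Int × Int) Int (fun p => p) (fun p => pvDv p.1 p.2 cs) pts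
  simpa using this

-- folding a batch of new center pairs into per-point d-values = extending each pvDv
theorem pvFoldNew_eq (pts : List (Int × Int)) :
    ∀ (new cs : List (Int × Int)),
      pvFoldNew pts new (pts.map (fun p => pvDv p.1 p.2 cs)) =
        pts.map (fun p => pvDv p.1 p.2 (cs ++ new)) := by
  intro new
  induction new with
  | nil => intro cs; unfold pvFoldNew; simp
  | cons c new ih =>
      intro cs
      unfold pvFoldNew
      simp only [List.foldl_cons]
      rw [zip_map_dv, List.map_map]
      have hstep : ((fun q : (Int × Int) × Int => max q.2 (pvDist q.1.1 q.1.2 c.1 c.2)) ∘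
          fun p : Int × Int => (p, pvDv p.1 p.2 cs)) =
          fun p : Int × Int => pvDv p.1 p.2 (cs ++ [c]) := by
        funext p
        simp [Function.comp, pvDv_append]
      rw [hstep]
      have := ih (cs ++ [c])
      unfold pvFoldNew at this
      rw [this, List.append_assoc]
      rfl

-- appending one element to each coordinate list extends their zip by some suffix
theorem zip_append_suffix (u : List Int) :
    ∀ (v : List Int) (a b : Int), ∃ r : List (Int × Int),
      (u ++ [a]).zip (v ++ [b]) = u.zip v ++ r := by
  induction u with
  | nil =>
      intro v a b
      exact ⟨([a]).zip (v ++ [b]), by simp⟩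
  | cons x u' ih =>
      intro v a b
      cases v with
      | nil => exact ⟨(x :: u' ++ [a]).zip [b], by simp⟩
      | cons y v' =>
          obtain ⟨r, hr⟩ := ih v' a b
          exact ⟨r, by simp only [List.cons_append, List.zip_cons_cons, hr]⟩

-- the relational invariant: B's state vs A's state (seen center pairs already folded into d)
def pvRel (pts : List (Int × Int)) (sA : List Int × List Int × Int × Int × Int)
    (sB : List Int × List Int × Nat × Int × Int × Int × List Int) : Prop :=
  ∃ seen : Nat, seen ≤ (sA.1.zip sA.2.1).length ∧
    sB = (sA.1, sA.2.1, seen, sA.2.2.1, sA.2.2.2.1, sA.2.2.2.2,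
      pts.map (fun p => pvDv p.1 p.2 ((sA.1.zip sA.2.1).take seen)))

theorem pvRound_rel (pts : List (Int × Int)) (sA : List Int × List Int × Int × Int × Int)
    (sB : List Int × List Int × Nat × Int × Int × Int × List Int)
    (hmd : 0 ≤ sA.2.2.2.2) (hrel : pvRel pts sA sB) :
    pvRel pts (pvRoundA pts sA) (pvRoundB pts sB) := by
  obtain ⟨cx, cy, mx, my, md⟩ := sA
  obtain ⟨seen, hle, hB⟩ := hrel
  simp only at hmd hle hB
  subst hB
  unfold pvRoundA pvRoundB
  simp only
  have hd : pvFoldNew pts ((cx.zip cy).drop seen)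
      (pts.map (fun p => pvDv p.1 p.2 ((cx.zip cy).take seen))) =
      pts.map (fun p => pvDv p.1 p.2 (cx.zip cy)) := by
    rw [pvFoldNew_eq pts ((cx.zip cy).drop seen) ((cx.zip cy).take seen),
        List.take_append_drop]
  rw [hd, roundA_pick pts (cx.zip cy) mx my md hmd]
  set st := pvPick (pts.zip (pts.map (fun p => pvDv p.1 p.2 (cx.zip cy)))) (mx, my, md) with hst
  refine ⟨(cx.zip cy).length, ?_, ?_⟩
  · obtain ⟨r, hr⟩ := zip_append_suffix cx cy st.1 st.2.1
    simp only [hr, List.length_append]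
    omega
  · obtain ⟨r, hr⟩ := zip_append_suffix cx cy st.1 st.2.1
    simp only [hr]
    rw [List.take_left]

theorem roundA_md (pts : List (Int × Int)) (s : List Int × List Int × Int × Int × Int)
    (hmd : 0 ≤ s.2.2.2.2) : 0 ≤ (pvRoundA pts s).2.2.2.2 := by
  obtain ⟨cx, cy, mx, my, md⟩ := s
  simp only at hmd
  unfold pvRoundA
  simp only
  rw [roundA_pick pts (cx.zip cy) mx my md hmd]
  have := pick_md_ge (pts.zip (pts.map (fun p => pvDv p.1 p.2 (cx.zip cy)))) (mx, my, md)
  simp only at this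
  omega

theorem main_fold (pts : List (Int × Int)) :
    ∀ (l : List Int) (sA : List Int × List Int × Int × Int × Int)
      (sB : List Int × List Int × Nat × Int × Int × Int × List Int),
      0 ≤ sA.2.2.2.2 → pvRel pts sA sB →
      pvRel pts (l.foldl (fun s _ => pvRoundA pts s) sA)
        (l.foldl (fun s _ => pvRoundB pts s) sB) := by
  intro l
  induction l with
  | nil => intro sA sB _ h; exact h
  | cons i l ih =>
      intro sA sB hmd hrel
      simp only [List.foldl_cons]
      exact ih (pvRoundA pts sA) (pvRoundB pts sB) (roundA_md pts sA hmd)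
        (pvRound_rel pts sA sB hmd hrel)

-- ===== VERDICT (by name: the statement is the Claim_ definition above) =====
theorem choose_center_spec : Claim_equal_choose_center := by
  intro pot_x pot_y centers_x centers_y k _
  unfold Spec_choose_center choose_center choose_center_alt
  simp only
  have h0 : pvRel (pot_x.zip pot_y) (centers_x, centers_y, 0, 0, 0)
      (centers_x, centers_y, 0, 0, 0, 0, (pot_x.zip pot_y).map (fun _ => (0 : Int))) := by
    refine ⟨0, Nat.zero_le _, ?_⟩
    simp [pvDv]
  have h := main_fold (pot_x.zip pot_y) (PySem.List.pyRange 0 (k - 1) 1)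
    (centers_x, centers_y, 0, 0, 0)
    (centers_x, centers_y, 0, 0, 0, 0, (pot_x.zip pot_y).map (fun _ => (0 : Int)))
    (le_refl 0) h0
  obtain ⟨seen, _, hB⟩ := h
  rw [hB]
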